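-- pv_equiv track=rewrite | github.com/toriboo/Alg1 | main.py | gaps_hib
-- ===== SOURCE A (Python) =====
-- def gaps_hib(A):
--     n = len(A)
--     gaps = []
--     k = 1
--     gaps.append(1)
--     while ( 2**k -1 < n):
--         gaps.append(2**k - 1)
--         k += 1
--     return gaps[n:0:-1]
-- ===== SOURCE B (Python) =====
-- def gaps_hib(A):
--     # Halving recursion: the Hibbard gap list for n is obtained from the one for
--     # n//2 by doubling-plus-one each gap and appending a trailing 1; no search
--     # loop, no bit tricks, no reverse slice.
--     def rec(n):
--         if n <= 1:
--             return []
--         return [2 * g + 1 for g in rec(n // 2)] + [1]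
--     return rec(len(A))
-- ===== Notes on version B (the rewrite author's own statement) =====
-- stated objective: alternative
-- what changed: B builds the gap list by a halving recursion gaps(n) = [2*g+1 for g in gaps(n//2)] + [1] (empty for n<=1), producing the descending Hibbard sequence directly with no doubling search loop, no dummy-prepend and no reverse slice.
import Mathlib
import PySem

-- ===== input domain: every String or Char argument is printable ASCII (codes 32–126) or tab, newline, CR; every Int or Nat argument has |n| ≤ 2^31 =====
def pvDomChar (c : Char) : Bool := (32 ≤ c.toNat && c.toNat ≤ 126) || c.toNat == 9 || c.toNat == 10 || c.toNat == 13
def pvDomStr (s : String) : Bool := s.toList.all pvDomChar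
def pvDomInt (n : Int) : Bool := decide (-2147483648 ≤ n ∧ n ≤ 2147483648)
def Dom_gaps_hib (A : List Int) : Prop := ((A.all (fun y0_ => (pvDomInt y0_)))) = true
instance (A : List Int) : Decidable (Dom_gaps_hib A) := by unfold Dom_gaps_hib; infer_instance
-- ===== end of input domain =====

-- B builds the gap list by a halving recursion gaps(n) = map (2*·+1) (gaps (n/2)) ++ [1]
-- (empty for n ≤ 1), replacing A's doubling while-loop plus reverse slice; objective: alternative.

-- ===== PORT A =====
-- A's 'while (2**k - 1 < n): gaps.append(2**k - 1); k += 1' loop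
def gapsHibLoop (n k : Nat) (gaps : List Int) : List Int :=
  if (2:Int) ^ k - 1 < (n : Int) then gapsHibLoop n (k + 1) (gaps ++ [(2:Int) ^ k - 1]) else gaps
termination_by n + 1 - 2 ^ k
decreasing_by
  have h1 : 1 ≤ 2 ^ k := Nat.one_le_two_pow
  have h3 : 2 ^ k ≤ n := by
    have : ((2 ^ k : Nat) : Int) - 1 < (n : Int) := by push_cast; omega
    omega
  omega

def gaps_hib (A : List Int) : List Int :=
  let n := A.length
  let gaps : List Int := [1]
  let gaps := gapsHibLoop n 1 gaps
  -- gaps[n:0:-1]; step -1 never raises, so getD [] is unreachable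
  (PySem.List.slice? gaps (some (n : Int)) (some 0) (-1)).getD []

-- ===== PORT B =====
-- Source B's inner 'rec': recursion on n // 2
def gapsHibRec (n : Nat) : List Int :=
  if n ≤ 1 then []
  else (gapsHibRec (n / 2)).map (fun g => 2 * g + 1) ++ [1]
termination_by n
decreasing_by omega

def gaps_hib_alt (A : List Int) : List Int := gapsHibRec A.length

-- ===== PRECONDITION & SPEC =====
def Spec_gaps_hib (A : List Int) (out : List Int) : Prop := out = gaps_hib_alt A
instance (A : List Int) (out : List Int) : Decidable (Spec_gaps_hib A out) := by unfold Spec_gaps_hib; infer_instance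

-- ===== CLAIM (what is proved, stated in full; the proofs are below) =====
def Claim_equal_gaps_hib : Prop := ∀ (A : List Int), Dom_gaps_hib A → Spec_gaps_hib A (gaps_hib A)

-- ===== LEMMAS AND PROOFS =====

-- A's loop appends 2^j - 1 for j = k, …, Nat.size n - 1
theorem gapsHibLoop_eq (n : Nat) : ∀ (d k : Nat), d = Nat.size n - k → ∀ (gaps : List Int),
    gapsHibLoop n k gaps = gaps ++ (List.range' k d).map (fun j => (2:Int) ^ j - 1) := by
  intro d
  induction d with
  | zero =>
    intro k hk gaps
    rw [gapsHibLoop]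
    have hnot : ¬ 2 ^ k ≤ n := by
      intro h
      exact absurd (Nat.lt_size.mpr h) (by omega)
    have h1 : 1 ≤ 2 ^ k := Nat.one_le_two_pow
    have hc : ¬ ((2:Int) ^ k - 1 < (n : Int)) := by
      intro h
      apply hnot
      have : ((2 ^ k : Nat) : Int) - 1 < (n : Int) := by push_cast; omega
      omega
    simp [hc]
  | succ d ih =>
    intro k hk gaps
    have hklt : k < Nat.size n := by omega
    have hle : 2 ^ k ≤ n := Nat.lt_size.mp hklt
    have h1 : 1 ≤ 2 ^ k := Nat.one_le_two_pow
    have hcond : (2:Int) ^ k - 1 < (n : Int) := by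
      have : ((2 ^ k : Nat) : Int) ≤ (n : Int) := by exact_mod_cast hle
      push_cast at this ⊢; omega
    rw [gapsHibLoop]
    simp only [hcond, if_pos]
    rw [ih (k + 1) (by omega) (gaps ++ [(2:Int) ^ k - 1])]
    rw [List.range'_succ]
    simp

theorem range_filterMap_rev {α : Type} (x : α) (rest : List α) :
    (List.range rest.length).filterMap
      (fun (k : Nat) => (x :: rest)[((rest.length : Int) + -1 * (k : Int)).toNat]?) = rest.reverse := by
  induction rest using List.reverseRecOn with
  | nil => simp
  | append_singleton zs a ih =>
    have hlen : (zs ++ [a]).length = zs.length + 1 := by simp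
    rw [hlen, List.range_succ_eq_map, List.filterMap_cons]
    push_cast
    have h0 : (x :: (zs ++ [a]))[(((zs.length : Int)) + 1 + 0).toNat]? = some a := by
      rw [show (((zs.length : Int)) + 1 + 0).toNat = zs.length + 1 by omega,
        show x :: (zs ++ [a]) = (x :: zs) ++ [a] by simp,
        List.getElem?_append_right (by simp)]
      simp
    rw [h0]
    simp only [List.filterMap_map]
    have hrest : ∀ k ∈ List.range zs.length,
        ((fun (k : Nat) => (x :: (zs ++ [a]))[(((zs.length : Int) + 1) + -1 * (k : Int)).toNat]?) ∘ Nat.succ) k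
          = (fun (k : Nat) => (x :: zs)[((zs.length : Int) + -1 * (k : Int)).toNat]?) k := by
      intro k hk
      have hk' : k < zs.length := List.mem_range.mp hk
      simp only [Function.comp_apply]
      have hidx : (((zs.length : Int) + 1) + -1 * ((Nat.succ k : Nat) : Int)).toNat = zs.length - k := by
        push_cast; omega
      have hidx2 : ((zs.length : Int) + -1 * (k : Int)).toNat = zs.length - k := by omega
      rw [hidx, hidx2, show x :: (zs ++ [a]) = (x :: zs) ++ [a] by simp,
        List.getElem?_append_left (by simp)]
    rw [List.filterMap_congr hrest, ih]
    simp

-- xs[n:0:-1] with n at least the length of the tail: drop the head, reverse the rest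
theorem slice_rev_tail {α : Type} (x : α) (rest : List α) (n : Nat) (h : rest.length ≤ n) :
    PySem.List.slice? (x :: rest) (some (n : Int)) (some 0) (-1) = some rest.reverse := by
  unfold PySem.List.slice? PySem.List.sliceIndices
  have hnn : ¬ ((n : Int) < 0) := by omega
  have hL : (x :: rest).length = rest.length + 1 := by simp
  simp only [hL, hnn, if_pos, show ((-1:Int) < 0) from by omega,
    show ¬((-1:Int) = 0) from by omega, show ¬((0:Int) < -1) from by omega,
    if_false, show ¬((0:Int) < 0) from by omega, Nat.cast_add, Nat.cast_one]
  have hstart : min (n : Int) ((rest.length : Int) + 1 - 1) = (rest.length : Int) := by omega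
  have hstop : min (0:Int) ((rest.length : Int) + 1 - 1) = 0 := by omega
  rw [hstart, hstop]
  have hcnt : (if (0:Int) < (rest.length : Int) then
      (((rest.length : Int) - 0 + - -1 - 1) / - -1).toNat else 0) = rest.length := by
    split_ifs with h0
    · norm_num
    · omega
  rw [hcnt, range_filterMap_rev x rest]

-- size (n / 2) = size n - 1 for n ≥ 2
theorem size_half (n : Nat) (h : 2 ≤ n) : Nat.size (n / 2) = Nat.size n - 1 := by
  have hs1 : 1 < Nat.size n := Nat.lt_size.mpr (by simpa using h)
  apply Nat.le_antisymm
  · apply Nat.size_le.mpr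
    have := Nat.lt_size_self n
    have h2 : 2 ^ Nat.size n = 2 * 2 ^ (Nat.size n - 1) := by
      rw [← pow_succ']
      congr 1
      omega
    omega
  · have hle : 2 ^ (Nat.size n - 1) ≤ n := Nat.lt_size.mp (by omega)
    have h2 : 2 ^ (Nat.size n - 1) = 2 * 2 ^ (Nat.size n - 2) := by
      rw [← pow_succ']
      congr 1
      omega
    have h3 : 2 ^ (Nat.size n - 2) ≤ n / 2 := by omega
    have h4 := Nat.lt_size.mpr h3
    omega

-- B's recursion produces 2^j - 1 for j = size n - 1, …, 1
theorem gapsHibRec_eq (n : Nat) :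
    gapsHibRec n = ((List.range' 1 (Nat.size n - 1)).map (fun j => (2:Int) ^ j - 1)).reverse := by
  induction n using Nat.strong_induction_on with
  | _ n ih =>
    rw [gapsHibRec]
    by_cases h : n ≤ 1
    · have hsz : Nat.size n - 1 = 0 := by
        interval_cases n <;> simp [Nat.size]
      simp [h, hsz]
    · have h2 : 2 ≤ n := by omega
      simp only [h, if_false]
      rw [ih (n / 2) (by omega), size_half n h2]
      set c := Nat.size n - 1 with hc
      have hc1 : 1 ≤ c := by
        have : 1 < Nat.size n := Nat.lt_size.mpr (by simpa using h2)
        omega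
      have hrange : List.range' 1 c = 1 :: List.range' 2 (c - 1) := by
        rw [show c = (c - 1) + 1 by omega, List.range'_succ]
        norm_num
      have hshift : (List.range' 1 (c - 1)).map (fun j => 2 * ((2:Int) ^ j - 1) + 1)
          = (List.range' 2 (c - 1)).map (fun j => (2:Int) ^ j - 1) := by
        rw [List.range'_eq_map_range, List.range'_eq_map_range, List.map_map, List.map_map]
        apply List.map_congr_left
        intro j _
        simp only [Function.comp_apply]
        have hp : (2:Int) ^ (2 + j) = 2 ^ (1 + j) * 2 := by
          rw [show 2 + j = (1 + j) + 1 by omega, pow_succ]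
        rw [hp]
        ring
      rw [hrange, List.map_cons, List.reverse_cons, List.map_reverse, List.map_map]
      have hcomp : ((fun g => 2 * g + 1) ∘ fun j => (2:Int) ^ j - 1)
          = fun j => 2 * ((2:Int) ^ j - 1) + 1 := rfl
      rw [hcomp, hshift]
      norm_num

-- ===== VERDICT (by name: the statement is the Claim_ definition above) =====
theorem gaps_hib_spec : Claim_equal_gaps_hib := by
  intro A _
  show (PySem.List.slice? (gapsHibLoop A.length 1 [1]) (some (A.length : Int)) (some 0) (-1)).getD []
      = gapsHibRec A.length
  generalize A.length = n
  set c := Nat.size n - 1 with hc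
  rw [gapsHibLoop_eq n c 1 (by omega) [1], List.singleton_append]
  have hclen : ((List.range' 1 c).map (fun j => (2:Int) ^ j - 1)).length ≤ n := by
    simp only [List.length_map, List.length_range']
    have h1 : n < 2 ^ (n + 1) := by
      calc n < 2 ^ n := Nat.lt_two_pow_self
        _ ≤ 2 ^ (n + 1) := Nat.pow_le_pow_right (by omega) (by omega)
    have := Nat.size_le.mpr h1
    omega
  rw [slice_rev_tail 1 _ n hclen]
  simp only [Option.getD_some]
  rw [gapsHibRec_eq n]
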